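-- pv_equiv track=rewrite | github.com/dwyaneyao/RTV-Text-Extractor | rtv_text_extractor.py | first_string_literal
-- ===== SOURCE A (Python) =====
-- def scan_string_literal(text: str, start_index: int, delimiter: str) -> tuple[str, int] | None:
--     i = start_index + 1
--     escaped = False
--     while i < len(text):
--         ch = text[i]
--         if escaped:
--             escaped = False
--             i += 1
--             continue
--         if ch == "\\":
--             escaped = True
--             i += 1
--             continue
--         if ch == delimiter:
--             return text[start_index + 1 : i], i + 1
--         i += 1
--     return None
--
-- def first_string_literal(text: str) -> str:
--     i = 0
--     while i < len(text):
--         ch = text[i]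
--         if ch in ("'", '"'):
--             parsed = scan_string_literal(text, i, ch)
--             if parsed:
--                 literal, _ = parsed
--                 return literal
--         i += 1
--     return ""
-- ===== SOURCE B (Python) =====
-- def first_string_literal(text: str) -> str:
--     # One pass: for each quote kind record the first occurrence (opener) and the
--     # first unescaped same-kind quote after it (closer); answer is the span with
--     # the leftmost opener.  (Escape parity relative to an opener equals the global
--     # backslash-run parity, because the opener itself is not a backslash.)
--     o1 = c1 = o2 = c2 = None
--     run = 0  # length of the backslash run immediately before the current char
--     for j, ch in enumerate(text):
--         if ch == "\\":
--             run += 1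
--             continue
--         if ch == "'":
--             if o1 is None:
--                 o1 = j
--             elif c1 is None and run % 2 == 0:
--                 c1 = j
--         elif ch == '"':
--             if o2 is None:
--                 o2 = j
--             elif c2 is None and run % 2 == 0:
--                 c2 = j
--         run = 0
--     if c1 is not None and (c2 is None or o1 < o2):
--         return text[o1 + 1 : c1]
--     if c2 is not None:
--         return text[o2 + 1 : c2]
--     return ""
-- ===== Notes on version B (the rewrite author's own statement) =====
-- stated objective: faster
-- what changed: Replaces A's rescan-from-every-quote scanner (outer loop calling an escape-aware scan helper at each quote, worst-case quadratic) with a single left-to-right pass that tracks backslash-run parity and records, per quote kind, the first occurrence and the first unescaped closing quote after it, then returns the leftmost completed span.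
import Mathlib
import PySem

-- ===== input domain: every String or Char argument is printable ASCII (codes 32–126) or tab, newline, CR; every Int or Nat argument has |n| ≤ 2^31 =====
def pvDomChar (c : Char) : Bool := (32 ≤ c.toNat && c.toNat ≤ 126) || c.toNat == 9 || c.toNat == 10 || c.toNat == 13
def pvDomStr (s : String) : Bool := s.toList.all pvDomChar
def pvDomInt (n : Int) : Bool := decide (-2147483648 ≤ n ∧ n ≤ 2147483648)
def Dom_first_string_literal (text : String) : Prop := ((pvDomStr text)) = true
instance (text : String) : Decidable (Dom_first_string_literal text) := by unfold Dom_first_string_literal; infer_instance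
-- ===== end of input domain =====

-- B replaces A's scan-from-every-quote helper by one left-to-right pass that records, per
-- quote kind, the first occurrence and the first unescaped closing quote after it
-- (alternative single-pass algorithm; same return value, proved below).

-- ===== PORT A =====
-- the while-loop of scan_string_literal (state: i, escaped)
def scanSLAux (cs : List Char) (start : Nat) (delim : Char) (i : Nat) (escaped : Bool) :
    Option (String × Nat) :=
  if h : i < cs.length then
    if escaped then scanSLAux cs start delim (i + 1) false
    else if cs[i] = '\\' then scanSLAux cs start delim (i + 1) true
    else if cs[i] = delim then
      some (String.ofList ((cs.drop (start + 1)).take (i - (start + 1))), i + 1)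
    else scanSLAux cs start delim (i + 1) false
  else none
termination_by cs.length - i

def scan_string_literal (cs : List Char) (start_index : Nat) (delimiter : Char) :
    Option (String × Nat) :=
  scanSLAux cs start_index delimiter (start_index + 1) false

-- the while-loop of first_string_literal (state: i)
def aOuter (cs : List Char) (i : Nat) : String :=
  if h : i < cs.length then
    if cs[i] = '\'' ∨ cs[i] = '"' then
      match scan_string_literal cs i cs[i] with
      | some (lit, _) => lit
      | none => aOuter cs (i + 1)
    else aOuter cs (i + 1)
  else ""
termination_by cs.length - i

def first_string_literal (text : String) : String := aOuter text.toList 0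

-- ===== PORT B =====
-- the for-loop of Source B (state: o1 c1 o2 c2 run; j is the enumerate counter)
def bLoop (l : List Char) (j : Nat) (o1 c1 o2 c2 : Option Nat) (run : Nat) :
    Option Nat × Option Nat × Option Nat × Option Nat × Nat :=
  match l with
  | [] => (o1, c1, o2, c2, run)
  | ch :: rest =>
    if ch = '\\' then bLoop rest (j + 1) o1 c1 o2 c2 (run + 1)
    else if ch = '\'' then
      if o1 = none then bLoop rest (j + 1) (some j) c1 o2 c2 0
      else if c1 = none ∧ run % 2 = 0 then bLoop rest (j + 1) o1 (some j) o2 c2 0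
      else bLoop rest (j + 1) o1 c1 o2 c2 0
    else if ch = '"' then
      if o2 = none then bLoop rest (j + 1) o1 c1 (some j) c2 0
      else if c2 = none ∧ run % 2 = 0 then bLoop rest (j + 1) o1 c1 o2 (some j) 0
      else bLoop rest (j + 1) o1 c1 o2 c2 0
    else bLoop rest (j + 1) o1 c1 o2 c2 0

def first_string_literal_alt (text : String) : String :=
  let cs := text.toList
  match bLoop cs 0 none none none none 0 with
  | (o1, c1, o2, c2, _run) =>
    if c1.isSome ∧ (c2 = none ∨ o1.get! < o2.get!) then
      String.ofList ((cs.drop (o1.get! + 1)).take (c1.get! - (o1.get! + 1)))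
    else if c2.isSome then
      String.ofList ((cs.drop (o2.get! + 1)).take (c2.get! - (o2.get! + 1)))
    else ""

-- ===== PRECONDITION & SPEC =====
def Spec_first_string_literal (text : String) (out : String) : Prop := out = first_string_literal_alt text
instance (text : String) (out : String) : Decidable (Spec_first_string_literal text out) := by unfold Spec_first_string_literal; infer_instance

-- ===== CLAIM (what is proved, stated in full; the proofs are below) =====
def Claim_equal_first_string_literal : Prop := ∀ (text : String), Dom_first_string_literal text → Spec_first_string_literal text (first_string_literal text)

-- ===== LEMMAS AND PROOFS =====

def findFromP (p : Nat → Bool) (len i : Nat) : Option Nat :=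
  if _h : i < len then
    if p i then some i else findFromP p len (i + 1)
  else none
termination_by len - i

lemma findFromP_eq_some_iff (p : Nat → Bool) (len i j : Nat) :
    findFromP p len i = some j ↔
      (i ≤ j ∧ j < len ∧ p j = true ∧ ∀ m, i ≤ m → m < j → p m = false) := by
  fun_induction findFromP p len i with
  | case1 i h hp =>
    simp only [Option.some_inj]
    constructor
    · rintro rfl; exact ⟨le_refl _, h, hp, fun m h1 h2 => absurd h1 (by omega)⟩
    · rintro ⟨h1, h2, h3, h4⟩
      rcases Nat.eq_or_lt_of_le h1 with rfl | hlt
      · rfl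
      · exact absurd hp (by simpa using h4 i (le_refl _) hlt)
  | case2 i h hp ih =>
    rw [ih]
    constructor
    · rintro ⟨h1, h2, h3, h4⟩
      exact ⟨by omega, h2, h3, fun m hm1 hm2 => by
        rcases Nat.eq_or_lt_of_le hm1 with rfl | h5
        · simpa using hp
        · exact h4 m h5 hm2⟩
    · rintro ⟨h1, h2, h3, h4⟩
      refine ⟨by
        rcases Nat.eq_or_lt_of_le h1 with rfl | h5
        · exact absurd h3 (by simpa using hp)
        · omega, h2, h3, fun m hm1 hm2 => h4 m (by omega) hm2⟩
  | case3 i h =>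
    constructor
    · intro h'; exact absurd h' (by simp)
    · rintro ⟨h1, h2, _, _⟩; omega

lemma findFromP_eq_none_iff (p : Nat → Bool) (len i : Nat) :
    findFromP p len i = none ↔ ∀ j, i ≤ j → j < len → p j = false := by
  fun_induction findFromP p len i with
  | case1 i h hp =>
    constructor
    · intro h'; exact absurd h' (by simp)
    · intro h'; exact absurd hp (by simpa using h' i (le_refl _) h)
  | case2 i h hp ih =>
    rw [ih]
    constructor
    · intro h' j hj1 hj2
      rcases Nat.eq_or_lt_of_le hj1 with rfl | h5
      · simpa using hp
      · exact h' j h5 hj2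
    · intro h' j hj1 hj2; exact h' j (by omega) hj2
  | case3 i h =>
    simp only [true_iff]
    intro j hj1 hj2; omega

def trunc (o : Option Nat) (n : Nat) : Option Nat :=
  match o with
  | some k => if k < n then some k else none
  | none => none

lemma trunc_inc (p : Nat → Bool) (len i n : Nat) (h : p n = false) :
    trunc (findFromP p len i) (n + 1) = trunc (findFromP p len i) n := by
  cases ho : findFromP p len i with
  | none => rfl
  | some j =>
    obtain ⟨_, _, hpj, _⟩ := (findFromP_eq_some_iff p len i j).1 ho
    have hjn : j ≠ n := by rintro rfl; rw [hpj] at h; exact absurd h (by simp)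
    simp only [trunc]
    by_cases hj : j < n
    · rw [if_pos hj, if_pos (by omega)]
    · rw [if_neg hj, if_neg (by omega)]

lemma trunc_hit (p : Nat → Bool) (len i n : Nat) (hp : p n = true) (hi : i ≤ n) (hn : n < len)
    (ht : trunc (findFromP p len i) n = none) : findFromP p len i = some n := by
  cases ho : findFromP p len i with
  | none =>
    have := (findFromP_eq_none_iff p len i).1 ho n hi hn
    rw [hp] at this; exact absurd this (by simp)
  | some j =>
    obtain ⟨h1, h2, h3, h4⟩ := (findFromP_eq_some_iff p len i j).1 ho
    rw [ho] at ht; simp only [trunc] at ht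
    have hjn : ¬ j < n := by intro hlt; rw [if_pos hlt] at ht; exact absurd ht (by simp)
    have h5 : ¬ n < j := by intro hlt; have := h4 n hi hlt; rw [hp] at this; exact absurd this (by simp)
    rw [show j = n by omega]

def runAt (cs : List Char) : Nat → Nat
  | 0 => 0
  | j + 1 => if cs[j]? = some '\\' then runAt cs j + 1 else 0

def unescB (cs : List Char) (d : Char) (j : Nat) : Bool :=
  (cs[j]? == some d) && (runAt cs j % 2 == 0)

def cClose (o : Option Nat) (p : Nat → Bool) (len : Nat) : Option Nat :=
  match o with
  | some s => findFromP p len (s + 1)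
  | none => none

def O1 (cs : List Char) : Option Nat := findFromP (fun k => cs[k]? == some '\'') cs.length 0

def O2 (cs : List Char) : Option Nat := findFromP (fun k => cs[k]? == some '"') cs.length 0

def C1 (cs : List Char) : Option Nat := cClose (O1 cs) (unescB cs '\'') cs.length

def C2 (cs : List Char) : Option Nat := cClose (O2 cs) (unescB cs '"') cs.length

lemma trunc_stable (o : Option Nat) (n : Nat) (k : Nat) (h : trunc o n = some k) :
    trunc o (n + 1) = some k := by
  cases o with
  | none => simp [trunc] at h
  | some j =>
    simp only [trunc] at h ⊢
    by_cases hj : j < n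
    · rw [if_pos hj] at h; rw [if_pos (by omega)]; exact h
    · rw [if_neg hj] at h; exact absurd h (by simp)

lemma trunc_findFromP_none (p : Nat → Bool) (len i m : Nat) (hm : m ≤ i) :
    trunc (findFromP p len i) m = none := by
  cases ho : findFromP p len i with
  | none => rfl
  | some j =>
    obtain ⟨h1, _, _, _⟩ := (findFromP_eq_some_iff p len i j).1 ho
    simp only [trunc]; rw [if_neg (by omega)]

lemma trunc_findFromP_len (p : Nat → Bool) (len i : Nat) :
    trunc (findFromP p len i) len = findFromP p len i := by
  cases ho : findFromP p len i with
  | none => rfl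
  | some j =>
    obtain ⟨_, h2, _, _⟩ := (findFromP_eq_some_iff p len i j).1 ho
    simp only [trunc]; rw [if_pos h2]

lemma trunc_cClose_len (o : Option Nat) (p : Nat → Bool) (len : Nat) :
    trunc (cClose o p len) len = cClose o p len := by
  cases o with
  | none => rfl
  | some s => exact trunc_findFromP_len p len (s + 1)

lemma trunc_cClose_inc (o : Option Nat) (p : Nat → Bool) (len n : Nat) (h : p n = false) :
    trunc (cClose o p len) (n + 1) = trunc (cClose o p len) n := by
  cases o with
  | none => rfl
  | some s => exact trunc_inc p len (s + 1) n h

lemma bLoop_inv (cs : List Char) : ∀ fuel n, cs.length - n = fuel → n ≤ cs.length →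
    bLoop (cs.drop n) n (trunc (O1 cs) n) (trunc (C1 cs) n) (trunc (O2 cs) n)
        (trunc (C2 cs) n) (runAt cs n)
      = (O1 cs, C1 cs, O2 cs, C2 cs, runAt cs cs.length) := by
  intro fuel
  induction fuel with
  | zero =>
    intro n hf hn
    have hlen : n = cs.length := by omega
    subst hlen
    rw [List.drop_length]
    simp only [bLoop]
    rw [O1, O2, C1, C2, trunc_findFromP_len, trunc_findFromP_len, trunc_cClose_len,
      trunc_cClose_len]
  | succ fuel ih =>
    intro n hf hn
    have hlt : n < cs.length := by omega
    have hget : cs[n]? = some cs[n] := List.getElem?_eq_getElem hlt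
    rw [List.drop_eq_getElem_cons hlt]
    have hrun1 : unescB cs '\'' n = ((cs[n] == '\'') && (runAt cs n % 2 == 0)) := by
      simp [unescB, hget]
    have hrun2 : unescB cs '"' n = ((cs[n] == '"') && (runAt cs n % 2 == 0)) := by
      simp [unescB, hget]
    have hP1 : (fun k => cs[k]? == some '\'') n = (cs[n] == '\'') := by simp [hget]
    have hP2 : (fun k => cs[k]? == some '"') n = (cs[n] == '"') := by simp [hget]
    simp only [bLoop]
    by_cases hbs : cs[n] = '\\'
    · rw [if_pos hbs]
      have hr : runAt cs (n + 1) = runAt cs n + 1 := by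
        simp [runAt, hget, hbs]
      rw [show trunc (O1 cs) n = trunc (O1 cs) (n+1) by
            rw [O1, trunc_inc]; simp [hget, hbs],
          show trunc (O2 cs) n = trunc (O2 cs) (n+1) by
            rw [O2, trunc_inc]; simp [hget, hbs],
          show trunc (C1 cs) n = trunc (C1 cs) (n+1) by
            rw [C1, trunc_cClose_inc]; rw [hrun1]; simp [hbs],
          show trunc (C2 cs) n = trunc (C2 cs) (n+1) by
            rw [C2, trunc_cClose_inc]; rw [hrun2]; simp [hbs],
          ← hr]
      exact ih (n+1) (by omega) (by omega)
    · have hr0 : runAt cs (n + 1) = 0 := by simp [runAt, hget, hbs]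
      by_cases hq1 : cs[n] = '\''
      · rw [if_neg (by simp [hq1]), if_pos hq1]
        have hO2inc : trunc (O2 cs) n = trunc (O2 cs) (n+1) := by
          rw [O2, trunc_inc]; simp [hget, hq1]
        have hC2inc : trunc (C2 cs) n = trunc (C2 cs) (n+1) := by
          rw [C2, trunc_cClose_inc]; rw [hrun2]; simp [hq1]
        by_cases ho1 : trunc (O1 cs) n = none
        · rw [if_pos ho1]
          have hO1 : O1 cs = some n := by
            rw [O1]; exact trunc_hit _ _ _ _ (by simp [hget, hq1]) (by omega) hlt ho1
          have hO1' : trunc (O1 cs) (n+1) = some n := by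
            rw [hO1]; simp [trunc]
          have hC1 : trunc (C1 cs) (n+1) = trunc (C1 cs) n := by
            rw [C1, hO1]
            simp only [cClose]
            rw [trunc_findFromP_none _ _ _ _ (le_refl _),
              trunc_findFromP_none _ _ _ _ (by omega)]
          rw [← hO1', ← hC1, hO2inc, hC2inc, ← hr0]
          exact ih (n+1) (by omega) (by omega)
        · rw [if_neg ho1]
          obtain ⟨s, hs⟩ : ∃ s, trunc (O1 cs) n = some s := by
            cases h' : trunc (O1 cs) n with
            | none => exact absurd h' ho1
            | some s => exact ⟨s, rfl⟩
          have hO1v : O1 cs = some s ∧ s < n := by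
            cases hO : O1 cs with
            | none => rw [hO] at hs; simp [trunc] at hs
            | some j =>
              rw [hO] at hs; simp only [trunc] at hs
              by_cases hj : j < n
              · rw [if_pos hj] at hs; cases hs; exact ⟨rfl, hj⟩
              · rw [if_neg hj] at hs; exact absurd hs (by simp)
          have hO1stable : trunc (O1 cs) (n+1) = some s := trunc_stable _ _ _ hs
          by_cases hc : trunc (C1 cs) n = none ∧ runAt cs n % 2 = 0
          · rw [if_pos hc]
            have hC1v : C1 cs = some n := by
              rw [C1, hO1v.1]
              simp only [cClose]
              refine trunc_hit _ _ _ _ ?_ (by omega) hlt ?_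
              · rw [hrun1]; simp [hq1, hc.2]
              · have := hc.1; rw [C1, hO1v.1] at this; exact this
            have hC1' : trunc (C1 cs) (n+1) = some n := by rw [hC1v]; simp [trunc]
            rw [hs, ← hO1stable, ← hC1', hO2inc, hC2inc, ← hr0]
            exact ih (n+1) (by omega) (by omega)
          · rw [if_neg hc]
            have hC1inc : trunc (C1 cs) (n+1) = trunc (C1 cs) n := by
              rcases Classical.em (trunc (C1 cs) n = none) with hnone | hsome
              · -- then run must be odd
                have hodd : ¬ (runAt cs n % 2 = 0) := fun h' => hc ⟨hnone, h'⟩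
                have hu : unescB cs '\'' n = false := by
                  rw [hrun1]; simp; intro _; omega
                rw [C1]; exact trunc_cClose_inc _ _ _ _ hu
              · obtain ⟨k, hk⟩ : ∃ k, trunc (C1 cs) n = some k := by
                  cases h' : trunc (C1 cs) n with
                  | none => exact absurd h' hsome
                  | some k => exact ⟨k, rfl⟩
                rw [hk]; exact trunc_stable _ _ _ hk
            rw [hs, ← hO1stable, ← hC1inc, hO2inc, hC2inc, ← hr0]
            exact ih (n+1) (by omega) (by omega)
      · rw [if_neg hbs, if_neg hq1]
        by_cases hq2 : cs[n] = '"'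
        · rw [if_pos hq2]
          have hO1inc : trunc (O1 cs) n = trunc (O1 cs) (n+1) := by
            rw [O1, trunc_inc]; simp [hget, hq2]
          have hC1inc : trunc (C1 cs) n = trunc (C1 cs) (n+1) := by
            rw [C1, trunc_cClose_inc]; rw [hrun1]; simp [hq2]
          by_cases ho2 : trunc (O2 cs) n = none
          · rw [if_pos ho2]
            have hO2 : O2 cs = some n := by
              rw [O2]; exact trunc_hit _ _ _ _ (by simp [hget, hq2]) (by omega) hlt ho2
            have hO2' : trunc (O2 cs) (n+1) = some n := by
              rw [hO2]; simp [trunc]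
            have hC2 : trunc (C2 cs) (n+1) = trunc (C2 cs) n := by
              rw [C2, hO2]
              simp only [cClose]
              rw [trunc_findFromP_none _ _ _ _ (le_refl _),
                trunc_findFromP_none _ _ _ _ (by omega)]
            rw [hO1inc, hC1inc, ← hO2', ← hC2, ← hr0]
            exact ih (n+1) (by omega) (by omega)
          · rw [if_neg ho2]
            obtain ⟨s, hs⟩ : ∃ s, trunc (O2 cs) n = some s := by
              cases h' : trunc (O2 cs) n with
              | none => exact absurd h' ho2
              | some s => exact ⟨s, rfl⟩
            have hO2v : O2 cs = some s ∧ s < n := by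
              cases hO : O2 cs with
              | none => rw [hO] at hs; simp [trunc] at hs
              | some j =>
                rw [hO] at hs; simp only [trunc] at hs
                by_cases hj : j < n
                · rw [if_pos hj] at hs; cases hs; exact ⟨rfl, hj⟩
                · rw [if_neg hj] at hs; exact absurd hs (by simp)
            have hO2stable : trunc (O2 cs) (n+1) = some s := trunc_stable _ _ _ hs
            by_cases hc : trunc (C2 cs) n = none ∧ runAt cs n % 2 = 0
            · rw [if_pos hc]
              have hC2v : C2 cs = some n := by
                rw [C2, hO2v.1]
                simp only [cClose]
                refine trunc_hit _ _ _ _ ?_ (by omega) hlt ?_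
                · rw [hrun2]; simp [hq2, hc.2]
                · have := hc.1; rw [C2, hO2v.1] at this; exact this
              have hC2' : trunc (C2 cs) (n+1) = some n := by rw [hC2v]; simp [trunc]
              rw [hO1inc, hC1inc, hs, ← hO2stable, ← hC2', ← hr0]
              exact ih (n+1) (by omega) (by omega)
            · rw [if_neg hc]
              have hC2inc : trunc (C2 cs) (n+1) = trunc (C2 cs) n := by
                rcases Classical.em (trunc (C2 cs) n = none) with hnone | hsome
                · have hodd : ¬ (runAt cs n % 2 = 0) := fun h' => hc ⟨hnone, h'⟩
                  have hu : unescB cs '"' n = false := by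
                    rw [hrun2]; simp; intro _; omega
                  rw [C2]; exact trunc_cClose_inc _ _ _ _ hu
                · obtain ⟨k, hk⟩ : ∃ k, trunc (C2 cs) n = some k := by
                    cases h' : trunc (C2 cs) n with
                    | none => exact absurd h' hsome
                    | some k => exact ⟨k, rfl⟩
                  rw [hk]; exact trunc_stable _ _ _ hk
              rw [hO1inc, hC1inc, hs, ← hO2stable, ← hC2inc, ← hr0]
              exact ih (n+1) (by omega) (by omega)
        · rw [if_neg hq2]
          have hO1inc : trunc (O1 cs) n = trunc (O1 cs) (n+1) := by
            rw [O1, trunc_inc]; simp [hget, hq1]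
          have hC1inc : trunc (C1 cs) n = trunc (C1 cs) (n+1) := by
            rw [C1, trunc_cClose_inc]; rw [hrun1]; simp [hq1]
          have hO2inc : trunc (O2 cs) n = trunc (O2 cs) (n+1) := by
            rw [O2, trunc_inc]; simp [hget, hq2]
          have hC2inc : trunc (C2 cs) n = trunc (C2 cs) (n+1) := by
            rw [C2, trunc_cClose_inc]; rw [hrun2]; simp [hq2]
          rw [hO1inc, hC1inc, hO2inc, hC2inc, ← hr0]
          exact ih (n+1) (by omega) (by omega)

lemma runAt_succ (cs : List Char) (n : Nat) :
    runAt cs (n + 1) = if cs[n]? = some '\\' then runAt cs n + 1 else 0 := rfl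

lemma scanSLAux_eq (cs : List Char) (s : Nat) (d : Char) (hd : d ≠ '\\') :
    ∀ fuel i esc, cs.length - i = fuel → (esc = true ↔ runAt cs i % 2 = 1) →
      scanSLAux cs s d i esc =
        (findFromP (unescB cs d) cs.length i).map
          (fun j => (String.ofList ((cs.drop (s + 1)).take (j - (s + 1))), j + 1)) := by
  intro fuel
  induction fuel with
  | zero =>
    intro i esc hf _
    have hge : ¬ i < cs.length := by omega
    rw [scanSLAux, findFromP, dif_neg hge, dif_neg hge]
    rfl
  | succ fuel ih =>
    intro i esc hf hesc
    have hlt : i < cs.length := by omega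
    have hget : cs[i]? = some cs[i] := List.getElem?_eq_getElem hlt
    rw [scanSLAux, findFromP, dif_pos hlt, dif_pos hlt]
    cases esc with
    | true =>
      rw [if_pos rfl]
      have hodd : runAt cs i % 2 = 1 := hesc.1 rfl
      have hu : unescB cs d i = false := by
        simp [unescB]; intro _; omega
      rw [hu, if_neg (by simp)]
      refine ih (i + 1) false (by omega) ?_
      rw [runAt_succ, hget]
      by_cases hb : cs[i] = '\\'
      · rw [if_pos (by rw [hb])]; simp; omega
      · rw [if_neg (by simp [hb])]; simp
    | false =>
      rw [if_neg (by simp)]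
      have heven : runAt cs i % 2 = 0 := by
        rcases Nat.mod_two_eq_zero_or_one (runAt cs i) with h | h
        · exact h
        · exact absurd (hesc.2 h) (by simp)
      by_cases hb : cs[i] = '\\'
      · rw [if_pos hb]
        have hu : unescB cs d i = false := by
          simp [unescB, hget, hb]; intro h'; exact absurd h'.symm hd
        rw [hu, if_neg (by simp)]
        refine ih (i + 1) true (by omega) ?_
        rw [runAt_succ, hget]
        rw [if_pos (by rw [hb]), ]
        simp; omega
      · rw [if_neg hb]
        by_cases hdq : cs[i] = d
        · rw [if_pos hdq]
          have hu : unescB cs d i = true := by simp [unescB, hget, hdq, heven]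
          rw [hu, if_pos rfl]
          rfl
        · rw [if_neg hdq]
          have hu : unescB cs d i = false := by simp [unescB, hget, hdq]
          rw [hu, if_neg (by simp)]
          refine ih (i + 1) false (by omega) ?_
          rw [runAt_succ, hget, if_neg (by simp [hb])]
          simp

def chAt (cs : List Char) (k : Nat) : Char := cs.getD k ' '

def openPred (cs : List Char) (k : Nat) : Bool :=
  (decide (cs[k]? = some '\'' ∨ cs[k]? = some '"')) &&
    (findFromP (unescB cs (chAt cs k)) cs.length (k + 1)).isSome

lemma aOuter_eq (cs : List Char) : ∀ fuel i, cs.length - i = fuel → aOuter cs i =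
    (match findFromP (openPred cs) cs.length i with
    | some k =>
      (match findFromP (unescB cs (chAt cs k)) cs.length (k + 1) with
      | some j => String.ofList ((cs.drop (k + 1)).take (j - (k + 1)))
      | none => "")
    | none => "") := by
  intro fuel
  induction fuel with
  | zero =>
    intro i hf
    have hge : ¬ i < cs.length := by omega
    rw [aOuter, findFromP, dif_neg hge, dif_neg hge]
  | succ fuel ih =>
    intro i hf
    have hlt : i < cs.length := by omega
    have hget : cs[i]? = some cs[i] := List.getElem?_eq_getElem hlt
    have hch : chAt cs i = cs[i] := by
      simp [chAt, List.getD_eq_getElem?_getD, hget]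
    rw [aOuter, findFromP, dif_pos hlt, dif_pos hlt]
    by_cases hq : cs[i] = '\'' ∨ cs[i] = '"'
    · rw [if_pos hq]
      have hnb : cs[i] ≠ '\\' := by rcases hq with h | h <;> rw [h] <;> decide
      have hscan : scan_string_literal cs i cs[i] =
          (findFromP (unescB cs cs[i]) cs.length (i + 1)).map
            (fun j => (String.ofList ((cs.drop (i + 1)).take (j - (i + 1))), j + 1)) := by
        rw [scan_string_literal]
        refine scanSLAux_eq cs i cs[i] hnb (cs.length - (i + 1)) (i + 1) false rfl ?_
        rw [runAt_succ, hget, if_neg (by simp [hnb])]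
        simp
      cases hfind : findFromP (unescB cs cs[i]) cs.length (i + 1) with
      | some j =>
        have hop : openPred cs i = true := by
          rw [openPred, hch, hget, hfind]; simp [hq]
        rw [hop, if_pos rfl]
        simp [hscan, hfind, hch]
      | none =>
        have hop : openPred cs i = false := by
          rw [openPred, hch, hget, hfind]; simp
        rw [hop, if_neg (by simp)]
        rw [hscan, hfind]
        simpa using ih (i + 1) (by omega)
    · rw [if_neg hq]
      have hop : openPred cs i = false := by
        rw [openPred, hget]
        simp only [Bool.and_eq_false_iff]
        left
        simpa using hq
      rw [hop, if_neg (by simp)]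
      exact ih (i + 1) (by omega)

lemma chAt_of_getElem? {cs : List Char} {m : Nat} {d : Char} (h : cs[m]? = some d) :
    chAt cs m = d := by
  simp [chAt, List.getD_eq_getElem?_getD, h]

lemma openPred_false_noq (cs : List Char) (m : Nat) (h1 : ¬ cs[m]? = some '\'')
    (h2 : ¬ cs[m]? = some '"') : openPred cs m = false := by
  simp [openPred, h1, h2]

lemma openPred_false_closer (cs : List Char) (m : Nat) (d : Char) (hd : cs[m]? = some d)
    (hnone : findFromP (unescB cs d) cs.length (m + 1) = none) : openPred cs m = false := by
  rw [openPred, chAt_of_getElem? hd, hnone]; simp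

lemma openPred_true (cs : List Char) (s : Nat) (d : Char) (j : Nat) (hd : cs[s]? = some d)
    (hj : findFromP (unescB cs d) cs.length (s + 1) = some j) (hq : d = '\'' ∨ d = '"') :
    openPred cs s = true := by
  rw [openPred, chAt_of_getElem? hd, hd, hj]
  rcases hq with rfl | rfl <;> simp

lemma closer_none (cs : List Char) (d : Char)
    (hC : cClose (findFromP (fun k => cs[k]? == some d) cs.length 0) (unescB cs d) cs.length
      = none)
    (k : Nat) (hk : cs[k]? = some d) :
    findFromP (unescB cs d) cs.length (k + 1) = none := by
  have hklen : k < cs.length := (List.getElem?_eq_some_iff.1 hk).1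
  cases hO : findFromP (fun k => cs[k]? == some d) cs.length 0 with
  | none =>
    have := (findFromP_eq_none_iff _ _ _).1 hO k (by omega) hklen
    rw [hk] at this; simp at this
  | some s =>
    rw [hO] at hC; simp only [cClose] at hC
    obtain ⟨_, _, hps, hmin⟩ := (findFromP_eq_some_iff _ _ _ _).1 hO
    have hsk : s ≤ k := by
      by_contra h
      have := hmin k (by omega) (by omega)
      rw [hk] at this; simp at this
    rw [findFromP_eq_none_iff] at hC ⊢
    intro j hj1 hj2
    exact hC j (by omega) hj2

lemma final_eq (cs : List Char) :
    aOuter cs 0 =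
      (if (C1 cs).isSome ∧ (C2 cs = none ∨ (O1 cs).get! < (O2 cs).get!) then
        String.ofList ((cs.drop ((O1 cs).get! + 1)).take ((C1 cs).get! - ((O1 cs).get! + 1)))
      else if (C2 cs).isSome then
        String.ofList ((cs.drop ((O2 cs).get! + 1)).take ((C2 cs).get! - ((O2 cs).get! + 1)))
      else "") := by
  rw [aOuter_eq cs cs.length 0 (by omega)]
  cases hC1 : C1 cs with
  | some j1 =>
    obtain ⟨s1, hO1⟩ : ∃ s, O1 cs = some s := by
      cases hO : O1 cs with
      | none => rw [C1, hO] at hC1; simp [cClose] at hC1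
      | some s => exact ⟨s, rfl⟩
    have hfind1 : findFromP (unescB cs '\'') cs.length (s1 + 1) = some j1 := by
      rw [C1, hO1] at hC1; exact hC1
    have hO1' := hO1
    rw [O1] at hO1'
    obtain ⟨_, hs1len, hp1, hmin1⟩ := (findFromP_eq_some_iff _ _ _ _).1 hO1'
    have hq1 : cs[s1]? = some '\'' := by simpa using hp1
    cases hC2 : C2 cs with
    | none =>
      have hfOpen : findFromP (openPred cs) cs.length 0 = some s1 := by
        rw [findFromP_eq_some_iff]
        refine ⟨Nat.zero_le _, hs1len, openPred_true cs s1 '\'' j1 hq1 hfind1 (Or.inl rfl), ?_⟩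
        intro m _ hm
        cases hmq : cs[m]? with
        | none => exact openPred_false_noq cs m (by simp [hmq]) (by simp [hmq])
        | some c =>
          by_cases hc1 : c = '\''
          · subst hc1
            have := hmin1 m (by omega) hm; rw [hmq] at this; simp at this
          · by_cases hc2 : c = '"'
            · subst hc2
              refine openPred_false_closer cs m '"' hmq ?_
              refine closer_none cs '"' ?_ m hmq
              rw [← O2, ← C2]
              exact hC2
            · exact openPred_false_noq cs m (by simp [hmq, hc1]) (by simp [hmq, hc2])
      rw [hfOpen, hO1]
      rw [if_pos (by simp)]
      simp [chAt_of_getElem? hq1, hfind1]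
    | some j2 =>
      obtain ⟨s2, hO2⟩ : ∃ s, O2 cs = some s := by
        cases hO : O2 cs with
        | none => rw [C2, hO] at hC2; simp [cClose] at hC2
        | some s => exact ⟨s, rfl⟩
      have hfind2 : findFromP (unescB cs '"') cs.length (s2 + 1) = some j2 := by
        rw [C2, hO2] at hC2; exact hC2
      have hO2' := hO2
      rw [O2] at hO2'
      obtain ⟨_, hs2len, hp2, hmin2⟩ := (findFromP_eq_some_iff _ _ _ _).1 hO2'
      have hq2 : cs[s2]? = some '"' := by simpa using hp2
      have hne : s1 ≠ s2 := by
        intro h; rw [h, hq2] at hq1; simp at hq1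
      rcases Nat.lt_or_ge s1 s2 with hlt | hge
      · have hfOpen : findFromP (openPred cs) cs.length 0 = some s1 := by
          rw [findFromP_eq_some_iff]
          refine ⟨Nat.zero_le _, hs1len, openPred_true cs s1 '\'' j1 hq1 hfind1 (Or.inl rfl), ?_⟩
          intro m _ hm
          cases hmq : cs[m]? with
          | none => exact openPred_false_noq cs m (by simp [hmq]) (by simp [hmq])
          | some c =>
            by_cases hc1 : c = '\''
            · subst hc1
              have := hmin1 m (by omega) hm; rw [hmq] at this; simp at this
            · by_cases hc2 : c = '"'
              · subst hc2
                have := hmin2 m (by omega) (by omega); rw [hmq] at this; simp at this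
              · exact openPred_false_noq cs m (by simp [hmq, hc1]) (by simp [hmq, hc2])
        rw [hfOpen, hO1, hO2]
        rw [if_pos (by simp; omega)]
        simp [chAt_of_getElem? hq1, hfind1]
      · have hlt2 : s2 < s1 := by omega
        have hfOpen : findFromP (openPred cs) cs.length 0 = some s2 := by
          rw [findFromP_eq_some_iff]
          refine ⟨Nat.zero_le _, hs2len, openPred_true cs s2 '"' j2 hq2 hfind2 (Or.inr rfl), ?_⟩
          intro m _ hm
          cases hmq : cs[m]? with
          | none => exact openPred_false_noq cs m (by simp [hmq]) (by simp [hmq])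
          | some c =>
            by_cases hc1 : c = '\''
            · subst hc1
              have := hmin1 m (by omega) (by omega); rw [hmq] at this; simp at this
            · by_cases hc2 : c = '"'
              · subst hc2
                have := hmin2 m (by omega) hm; rw [hmq] at this; simp at this
              · exact openPred_false_noq cs m (by simp [hmq, hc1]) (by simp [hmq, hc2])
        rw [hfOpen, hO1, hO2]
        rw [if_neg (by simp; omega)]
        rw [if_pos (by simp)]
        simp [chAt_of_getElem? hq2, hfind2]
  | none =>
    cases hC2 : C2 cs with
    | some j2 =>
      obtain ⟨s2, hO2⟩ : ∃ s, O2 cs = some s := by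
        cases hO : O2 cs with
        | none => rw [C2, hO] at hC2; simp [cClose] at hC2
        | some s => exact ⟨s, rfl⟩
      have hfind2 : findFromP (unescB cs '"') cs.length (s2 + 1) = some j2 := by
        rw [C2, hO2] at hC2; exact hC2
      have hO2' := hO2
      rw [O2] at hO2'
      obtain ⟨_, hs2len, hp2, hmin2⟩ := (findFromP_eq_some_iff _ _ _ _).1 hO2'
      have hq2 : cs[s2]? = some '"' := by simpa using hp2
      have hfOpen : findFromP (openPred cs) cs.length 0 = some s2 := by
        rw [findFromP_eq_some_iff]
        refine ⟨Nat.zero_le _, hs2len, openPred_true cs s2 '"' j2 hq2 hfind2 (Or.inr rfl), ?_⟩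
        intro m _ hm
        cases hmq : cs[m]? with
        | none => exact openPred_false_noq cs m (by simp [hmq]) (by simp [hmq])
        | some c =>
          by_cases hc1 : c = '\''
          · subst hc1
            refine openPred_false_closer cs m '\'' hmq ?_
            refine closer_none cs '\'' ?_ m hmq
            rw [← O1, ← C1]
            exact hC1
          · by_cases hc2 : c = '"'
            · subst hc2
              have := hmin2 m (by omega) hm; rw [hmq] at this; simp at this
            · exact openPred_false_noq cs m (by simp [hmq, hc1]) (by simp [hmq, hc2])
      rw [hfOpen, hO2]
      rw [if_neg (by simp)]
      rw [if_pos (by simp)]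
      simp [chAt_of_getElem? hq2, hfind2]
    | none =>
      have hfOpen : findFromP (openPred cs) cs.length 0 = none := by
        rw [findFromP_eq_none_iff]
        intro m _ hmlen
        cases hmq : cs[m]? with
        | none => exact openPred_false_noq cs m (by simp [hmq]) (by simp [hmq])
        | some c =>
          by_cases hc1 : c = '\''
          · subst hc1
            refine openPred_false_closer cs m '\'' hmq ?_
            refine closer_none cs '\'' ?_ m hmq
            rw [← O1, ← C1]
            exact hC1
          · by_cases hc2 : c = '"'
            · subst hc2
              refine openPred_false_closer cs m '"' hmq ?_
              refine closer_none cs '"' ?_ m hmq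
              rw [← O2, ← C2]
              exact hC2
            · exact openPred_false_noq cs m (by simp [hmq, hc1]) (by simp [hmq, hc2])
      rw [hfOpen]
      rw [if_neg (by simp)]
      rw [if_neg (by simp)]

-- ===== VERDICT (by name: the statement is the Claim_ definition above) =====
theorem first_string_literal_spec : Claim_equal_first_string_literal := by
  intro text _hdom
  simp only [Spec_first_string_literal, first_string_literal, first_string_literal_alt]
  have h0 : ∀ o : Option Nat, trunc o 0 = none := by intro o; cases o <;> simp [trunc]
  have hB : bLoop text.toList 0 none none none none 0
      = (O1 text.toList, C1 text.toList, O2 text.toList, C2 text.toList,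
          runAt text.toList text.toList.length) := by
    have h := bLoop_inv text.toList (text.toList.length - 0) 0 rfl (Nat.zero_le _)
    simpa [h0, runAt] using h
  rw [hB]
  exact final_eq text.toList
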